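-- pv_equiv track=rewrite | github.com/dansasser/SIM-ONE | code/mcp_server/protocols/governance/five_laws_validator/law1_architectural_intelligence.py | _assess_architectural_complexity
-- ===== SOURCE A (Python) =====
-- from typing import Dict, Any, List, Optional
--
-- def _assess_architectural_complexity(protocol_stack: List[str]) -> int:
--     """Assess the architectural complexity of the protocol coordination"""
--
--     complexity_score = 0
--
--     # Base complexity from number of protocols
--     complexity_score += len(protocol_stack)
--
--     # Bonus for diverse protocol types
--     protocol_types = set()
--     for protocol in protocol_stack:
--         if "Governance" in protocol or "Law" in protocol:
--             protocol_types.add("governance")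
--         elif any(cognitive in protocol for cognitive in ["Ideator", "Drafter", "Critic"]):
--             protocol_types.add("cognitive")
--         elif any(util in protocol for util in ["REP", "ESL", "VVP", "HIP"]):
--             protocol_types.add("utility")
--
--     complexity_score += len(protocol_types) * 2
--
--     # Bonus for sophisticated coordination patterns
--     if len(protocol_stack) >= 5:
--         complexity_score += 3  # Complex multi-protocol coordination
--     if "ArchitecturalIntelligenceProtocol" in protocol_stack:
--         complexity_score += 2  # Meta-cognitive awareness
--
--     return complexity_score
-- ===== SOURCE B (Python) =====
-- def _assess_architectural_complexity(protocol_stack):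
--     """Assess the architectural complexity of the protocol coordination."""
--
--     def is_governance(p):
--         return "Governance" in p or "Law" in p
--
--     def is_cognitive(p):
--         return not is_governance(p) and any(k in p for k in ("Ideator", "Drafter", "Critic"))
--
--     def is_utility(p):
--         return (not is_governance(p)
--                 and not any(k in p for k in ("Ideator", "Drafter", "Critic"))
--                 and any(k in p for k in ("REP", "ESL", "VVP", "HIP")))
--
--     n = len(protocol_stack)
--     diverse_types = sum(
--         1 for pred in (is_governance, is_cognitive, is_utility)
--         if any(pred(p) for p in protocol_stack)
--     )
--     return (n
--             + 2 * diverse_types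
--             + (3 if n >= 5 else 0)
--             + (2 if "ArchitecturalIntelligenceProtocol" in protocol_stack else 0))
-- ===== Notes on version B (the rewrite author's own statement) =====
-- stated objective: alternative
-- what changed: Replaces the single loop that accumulates a set of category names with three independent any(...) presence checks (governance / cognitive / utility predicates guarding the elif precedence per protocol) and sums the flags, so no set is built.
import Mathlib
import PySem

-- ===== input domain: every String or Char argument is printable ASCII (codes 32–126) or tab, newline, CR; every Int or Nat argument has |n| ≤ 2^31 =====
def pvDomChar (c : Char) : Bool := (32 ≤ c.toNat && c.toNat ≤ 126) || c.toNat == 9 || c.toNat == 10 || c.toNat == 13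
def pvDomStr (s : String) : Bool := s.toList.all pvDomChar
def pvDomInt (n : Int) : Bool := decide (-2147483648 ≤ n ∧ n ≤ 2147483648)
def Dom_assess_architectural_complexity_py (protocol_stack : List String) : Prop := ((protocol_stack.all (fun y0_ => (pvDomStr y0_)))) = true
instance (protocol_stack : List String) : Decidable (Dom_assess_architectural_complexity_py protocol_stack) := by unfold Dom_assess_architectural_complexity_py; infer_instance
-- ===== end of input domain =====

-- B replaces A's single set-accumulating loop with three independent any(...) presence checks summed as flags (alternative decomposition, same cost).

-- ===== PORT A =====
-- one iteration of A's 'for protocol in protocol_stack' loop over the set protocol_types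
def pvAStep (s : PySem.Set String) (protocol : String) : PySem.Set String :=
  if PySem.Str.isIn "Governance" protocol || PySem.Str.isIn "Law" protocol then
    PySem.Set.add s "governance"
  else if ["Ideator", "Drafter", "Critic"].any (fun cognitive => PySem.Str.isIn cognitive protocol) then
    PySem.Set.add s "cognitive"
  else if ["REP", "ESL", "VVP", "HIP"].any (fun util => PySem.Str.isIn util protocol) then
    PySem.Set.add s "utility"
  else s

def assess_architectural_complexity_py (protocol_stack : List String) : Int :=
  let complexity_score : Int := 0
  let complexity_score := complexity_score + (protocol_stack.length : Int)
  let protocol_types : PySem.Set String := protocol_stack.foldl pvAStep PySem.Set.empty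
  let complexity_score := complexity_score + (protocol_types.length : Int) * 2
  let complexity_score := if protocol_stack.length ≥ 5 then complexity_score + 3 else complexity_score
  let complexity_score := if protocol_stack.contains "ArchitecturalIntelligenceProtocol" then complexity_score + 2 else complexity_score
  complexity_score

-- ===== PORT B =====
def pvIsGovernance (p : String) : Bool :=
  PySem.Str.isIn "Governance" p || PySem.Str.isIn "Law" p

def pvIsCognitive (p : String) : Bool :=
  !pvIsGovernance p && ["Ideator", "Drafter", "Critic"].any (fun k => PySem.Str.isIn k p)

def pvIsUtility (p : String) : Bool :=
  !pvIsGovernance p && !(["Ideator", "Drafter", "Critic"].any (fun k => PySem.Str.isIn k p))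
    && ["REP", "ESL", "VVP", "HIP"].any (fun k => PySem.Str.isIn k p)

def assess_architectural_complexity_py_alt (protocol_stack : List String) : Int :=
  let n : Int := (protocol_stack.length : Int)
  let diverse_types : Int :=
    (if protocol_stack.any pvIsGovernance then 1 else 0)
    + (if protocol_stack.any pvIsCognitive then 1 else 0)
    + (if protocol_stack.any pvIsUtility then 1 else 0)
  n + 2 * diverse_types
    + (if n ≥ 5 then 3 else 0)
    + (if protocol_stack.contains "ArchitecturalIntelligenceProtocol" then 2 else 0)

-- ===== PRECONDITION & SPEC =====
def Spec_assess_architectural_complexity_py (protocol_stack : List String) (out : Int) : Prop := out = assess_architectural_complexity_py_alt protocol_stack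
instance (protocol_stack : List String) (out : Int) : Decidable (Spec_assess_architectural_complexity_py protocol_stack out) := by unfold Spec_assess_architectural_complexity_py; infer_instance

-- ===== CLAIM (what is proved, stated in full; the proofs are below) =====
def Claim_equal_assess_architectural_complexity_py : Prop := ∀ (protocol_stack : List String), Dom_assess_architectural_complexity_py protocol_stack → Spec_assess_architectural_complexity_py protocol_stack (assess_architectural_complexity_py protocol_stack)

-- ===== LEMMAS AND PROOFS =====

-- invariant of A's loop: the size of the accumulated set counts the category flags not already present
theorem pvFold_length (l : List String) : ∀ (s : PySem.Set String),
    ((l.foldl pvAStep s).length : Int)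
      = (s.length : Int)
        + (if l.any pvIsGovernance ∧ "governance" ∉ s then 1 else 0)
        + (if l.any pvIsCognitive ∧ "cognitive" ∉ s then 1 else 0)
        + (if l.any pvIsUtility ∧ "utility" ∉ s then 1 else 0) := by
  induction l with
  | nil => intro s; simp
  | cons p rest ih =>
    intro s
    simp only [List.foldl_cons, List.any_cons]
    by_cases hg : (PySem.Str.isIn "Governance" p || PySem.Str.isIn "Law" p) = true
    · have hG : pvIsGovernance p = true := hg
      have hC : pvIsCognitive p = false := by
        simp only [pvIsCognitive, hG, Bool.not_true, Bool.false_and]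
      have hU : pvIsUtility p = false := by
        simp only [pvIsUtility, hG, Bool.not_true, Bool.false_and]
      have e : pvAStep s p = PySem.Set.add s "governance" := by
        simp only [pvAStep]; rw [if_pos hg]
      rw [e, ih]
      simp only [hG, hC, hU, Bool.true_or, Bool.false_or]
      by_cases hmem : "governance" ∈ s
      · rw [PySem.Set.add_of_mem hmem]
        simp only [hmem, not_true_eq_false, and_false, if_false]
      · rw [PySem.Set.add_of_not_mem hmem]
        have m0 : "governance" ∈ s ++ ["governance"] := by simp
        have m1 : ("cognitive" ∈ s ++ ["governance"]) ↔ "cognitive" ∈ s := by simp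
        have m2 : ("utility" ∈ s ++ ["governance"]) ↔ "utility" ∈ s := by simp
        simp only [List.length_append, List.length_cons, List.length_nil, Nat.cast_add,
          Nat.cast_one, m0, m1, m2, hmem, not_true_eq_false, and_false, if_false,
          not_false_iff, and_true]
        split_ifs <;> omega
    · have hg' := hg
      simp only [Bool.not_eq_true] at hg
      have hG : pvIsGovernance p = false := hg
      by_cases hc : (["Ideator", "Drafter", "Critic"].any (fun cognitive => PySem.Str.isIn cognitive p)) = true
      · have hC : pvIsCognitive p = true := by
          simp only [pvIsCognitive, hG, Bool.not_false, Bool.true_and]; exact hc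
        have hU : pvIsUtility p = false := by
          simp only [pvIsUtility, hc, Bool.not_true, Bool.and_false, Bool.false_and]
        have e : pvAStep s p = PySem.Set.add s "cognitive" := by
          simp only [pvAStep]; rw [if_neg hg', if_pos hc]
        rw [e, ih]
        simp only [hG, hC, hU, Bool.true_or, Bool.false_or]
        by_cases hmem : "cognitive" ∈ s
        · rw [PySem.Set.add_of_mem hmem]
          simp only [hmem, not_true_eq_false, and_false, if_false]
        · rw [PySem.Set.add_of_not_mem hmem]
          have m0 : "cognitive" ∈ s ++ ["cognitive"] := by simp
          have m1 : ("governance" ∈ s ++ ["cognitive"]) ↔ "governance" ∈ s := by simp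
          have m2 : ("utility" ∈ s ++ ["cognitive"]) ↔ "utility" ∈ s := by simp
          simp only [List.length_append, List.length_cons, List.length_nil, Nat.cast_add,
            Nat.cast_one, m0, m1, m2, hmem, not_true_eq_false, and_false, if_false,
            not_false_iff, and_true]
          split_ifs <;> omega
      · have hc' := hc
        simp only [Bool.not_eq_true] at hc
        have hC : pvIsCognitive p = false := by
          simp only [pvIsCognitive, hc, Bool.and_false]
        by_cases hu : (["REP", "ESL", "VVP", "HIP"].any (fun util => PySem.Str.isIn util p)) = true
        · have hU : pvIsUtility p = true := by
            simp only [pvIsUtility, hG, hc, Bool.not_false, Bool.true_and]; exact hu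
          have e : pvAStep s p = PySem.Set.add s "utility" := by
            simp only [pvAStep]; rw [if_neg hg', if_neg hc', if_pos hu]
          rw [e, ih]
          simp only [hG, hC, hU, Bool.true_or, Bool.false_or]
          by_cases hmem : "utility" ∈ s
          · rw [PySem.Set.add_of_mem hmem]
            simp only [hmem, not_true_eq_false, and_false, if_false]
          · rw [PySem.Set.add_of_not_mem hmem]
            have m0 : "utility" ∈ s ++ ["utility"] := by simp
            have m1 : ("governance" ∈ s ++ ["utility"]) ↔ "governance" ∈ s := by simp
            have m2 : ("cognitive" ∈ s ++ ["utility"]) ↔ "cognitive" ∈ s := by simp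
            simp only [List.length_append, List.length_cons, List.length_nil, Nat.cast_add,
              Nat.cast_one, m0, m1, m2, hmem, not_true_eq_false, and_false, if_false,
              not_false_iff, and_true]
            split_ifs <;> omega
        · have hu' := hu
          simp only [Bool.not_eq_true] at hu
          have hU : pvIsUtility p = false := by
            simp only [pvIsUtility, hu, Bool.and_false]
          have e : pvAStep s p = s := by
            simp only [pvAStep]; rw [if_neg hg', if_neg hc', if_neg hu']
          rw [e, ih]
          simp only [hG, hC, hU, Bool.false_or]

-- ===== VERDICT (by name: the statement is the Claim_ definition above) =====
theorem assess_architectural_complexity_py_spec : Claim_equal_assess_architectural_complexity_py := by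
  intro protocol_stack _
  unfold Spec_assess_architectural_complexity_py
  unfold assess_architectural_complexity_py assess_architectural_complexity_py_alt
  have h := pvFold_length protocol_stack PySem.Set.empty
  simp only [PySem.Set.empty] at h
  simp only [List.not_mem_nil, not_false_iff, and_true, List.length_nil, Nat.cast_zero, zero_add] at h
  split_ifs <;> simp_all
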